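-- pv_equiv track=rewrite | github.com/arthurli1126/NLP-study | A2/code/BLEU_score.py | can_gram_count
-- ===== SOURCE A (Python) =====
-- def can_gram_count(ref_count, candidate):
--     words = candidate.split()[1:-1]
--     num_can_words = len(words)
--
--     unigram_count = 0
--     bigram_count = 0
--     trigram_count = 0
--
--     for i in range(len(words)):
--         first = words[i]
--         if first not in ref_count.keys():
--             continue
--         unigram_count += 1
--         if i + 1 == num_can_words: continue
--
--         sec = words[i + 1]
--         if sec not in ref_count[first].keys():
--             continue
--         bigram_count += 1
--         if i + 2 == num_can_words: continue
--
--         third = words[i + 2]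
--         if third not in ref_count[first][sec].keys():
--             continue
--         trigram_count += 1
--     return unigram_count,bigram_count,trigram_count
-- ===== SOURCE B (Python) =====
-- def can_gram_count(ref_count, candidate):
--     words = candidate.split()[1:-1]
--     n = len(words)
--     uni = sum(1 if w in ref_count else 0 for w in words)
--     bi = sum(1 if words[i] in ref_count and words[i + 1] in ref_count[words[i]] else 0
--              for i in range(n - 1))
--     tri = sum(1 if words[i] in ref_count and words[i + 1] in ref_count[words[i]]
--               and words[i + 2] in ref_count[words[i]][words[i + 1]] else 0
--               for i in range(n - 2))
--     return uni, bi, tri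
-- ===== Notes on version B (the rewrite author's own statement) =====
-- stated objective: simpler
-- what changed: Replaces A's single fused index loop with three mutable counters and early-continue guards by three independent one-line passes: a direct membership count over the words for unigrams and two separate window scans (of lengths n-1 and n-2) for bigrams and trigrams.
import Mathlib
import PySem

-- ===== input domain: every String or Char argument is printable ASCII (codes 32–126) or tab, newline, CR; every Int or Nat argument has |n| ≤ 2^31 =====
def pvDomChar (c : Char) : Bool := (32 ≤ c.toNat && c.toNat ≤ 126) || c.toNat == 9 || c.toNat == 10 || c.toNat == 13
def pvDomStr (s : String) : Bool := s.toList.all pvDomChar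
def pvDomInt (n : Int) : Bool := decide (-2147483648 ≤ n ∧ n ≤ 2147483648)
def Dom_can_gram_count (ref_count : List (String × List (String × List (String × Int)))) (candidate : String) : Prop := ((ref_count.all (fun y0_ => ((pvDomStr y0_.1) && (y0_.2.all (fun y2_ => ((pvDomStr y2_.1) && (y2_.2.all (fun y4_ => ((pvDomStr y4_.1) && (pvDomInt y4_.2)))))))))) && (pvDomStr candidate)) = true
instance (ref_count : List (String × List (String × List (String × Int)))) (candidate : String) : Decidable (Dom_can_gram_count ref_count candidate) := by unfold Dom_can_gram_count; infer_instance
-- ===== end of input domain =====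

-- B replaces A's single fused index loop (with continue-guards) by three independent
-- passes — a direct count over the words for unigrams and two separate window scans
-- for bigrams/trigrams (objective: simpler decomposition, same cost).

-- ===== PORT A =====
def can_gram_count (ref_count : List (String × List (String × List (String × Int)))) (candidate : String) : Int × Int × Int :=
  let words := PySem.List.slice (PySem.Str.split₀ candidate) (some 1) (some (-1))
  let num : Int := words.length
  (PySem.List.pyRange 0 num 1).foldl (fun acc i =>
    let first := PySem.List.pyGetD words i ""
    match ref_count.lookup first with
    | none => acc
    | some d1 =>
      let acc1 : Int × Int × Int := (acc.1 + 1, acc.2.1, acc.2.2)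
      if i + 1 = num then acc1
      else
        let sec := PySem.List.pyGetD words (i + 1) ""
        match d1.lookup sec with
        | none => acc1
        | some d2 =>
          let acc2 : Int × Int × Int := (acc1.1, acc1.2.1 + 1, acc1.2.2)
          if i + 2 = num then acc2
          else
            let third := PySem.List.pyGetD words (i + 2) ""
            match d2.lookup third with
            | none => acc2
            | some _ => (acc2.1, acc2.2.1, acc2.2.2 + 1))
    ((0 : Int), (0 : Int), (0 : Int))

-- ===== PORT B =====
def can_gram_count_alt (ref_count : List (String × List (String × List (String × Int)))) (candidate : String) : Int × Int × Int :=
  let words := PySem.List.slice (PySem.Str.split₀ candidate) (some 1) (some (-1))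
  let n : Int := words.length
  let uni := (words.map (fun w =>
      if (ref_count.lookup w).isSome then (1 : Int) else 0)).sum
  let bi := ((PySem.List.pyRange 0 (n - 1) 1).map (fun i =>
      if (match ref_count.lookup (PySem.List.pyGetD words i "") with
          | some d1 => (d1.lookup (PySem.List.pyGetD words (i + 1) "")).isSome
          | none => false) then (1 : Int) else 0)).sum
  let tri := ((PySem.List.pyRange 0 (n - 2) 1).map (fun i =>
      if (match ref_count.lookup (PySem.List.pyGetD words i "") with
          | some d1 =>
            (match d1.lookup (PySem.List.pyGetD words (i + 1) "") with
             | some d2 => (d2.lookup (PySem.List.pyGetD words (i + 2) "")).isSome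
             | none => false)
          | none => false) then (1 : Int) else 0)).sum
  (uni, bi, tri)

-- ===== PRECONDITION & SPEC =====
def Spec_can_gram_count (ref_count : List (String × List (String × List (String × Int)))) (candidate : String) (out : Int × Int × Int) : Prop := out = can_gram_count_alt ref_count candidate
instance (ref_count : List (String × List (String × List (String × Int)))) (candidate : String) (out : Int × Int × Int) : Decidable (Spec_can_gram_count ref_count candidate out) := by unfold Spec_can_gram_count; infer_instance

-- ===== CLAIM (what is proved, stated in full; the proofs are below) =====
def Claim_equal_can_gram_count : Prop := ∀ (ref_count : List (String × List (String × List (String × Int)))) (candidate : String), Dom_can_gram_count ref_count candidate → Spec_can_gram_count ref_count candidate (can_gram_count ref_count candidate)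

-- ===== LEMMAS AND PROOFS =====

-- the per-index contribution of A's loop to each of the three counters
def pvF (r : List (String × List (String × List (String × Int)))) (ws : List String) (i : Int) : Int :=
  if (r.lookup (PySem.List.pyGetD ws i "")).isSome then 1 else 0

def pvG (r : List (String × List (String × List (String × Int)))) (ws : List String) (i : Int) : Int :=
  match r.lookup (PySem.List.pyGetD ws i "") with
  | none => 0
  | some d1 =>
    if i + 1 = (ws.length : Int) then 0
    else if (d1.lookup (PySem.List.pyGetD ws (i + 1) "")).isSome then 1 else 0

def pvH (r : List (String × List (String × List (String × Int)))) (ws : List String) (i : Int) : Int :=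
  match r.lookup (PySem.List.pyGetD ws i "") with
  | none => 0
  | some d1 =>
    if i + 1 = (ws.length : Int) then 0
    else
      match d1.lookup (PySem.List.pyGetD ws (i + 1) "") with
      | none => 0
      | some d2 =>
        if i + 2 = (ws.length : Int) then 0
        else if (d2.lookup (PySem.List.pyGetD ws (i + 2) "")).isSome then 1 else 0

lemma pv_foldl_dec (f g h : Int → Int) (L : List Int) : ∀ acc : Int × Int × Int,
    L.foldl (fun a i => (a.1 + f i, a.2.1 + g i, a.2.2 + h i)) acc
      = (acc.1 + (L.map f).sum, acc.2.1 + (L.map g).sum, acc.2.2 + (L.map h).sum) := by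
  induction L with
  | nil => intro acc; simp
  | cons x xs ih =>
    intro acc
    simp [ih]
    refine ⟨by ring, by ring, by ring⟩

lemma pv_sum_guard (f f' : Int → Int) (m n : Int) (hmn : m ≤ n)
    (h1 : ∀ i, 0 ≤ i → i < m → f i = f' i)
    (h2 : ∀ i, m ≤ i → i < n → f i = 0) :
    ((PySem.List.pyRange 0 n 1).map f).sum = ((PySem.List.pyRange 0 m 1).map f').sum := by
  by_cases hm : m ≤ 0
  · rw [PySem.List.pyRange_one_eq_nil hm]
    have : (PySem.List.pyRange 0 n 1).map f = (PySem.List.pyRange 0 n 1).map (fun _ => (0 : Int)) := by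
      apply List.map_congr_left
      intro i hi
      rw [PySem.List.mem_pyRange_one] at hi
      exact h2 i (le_trans hm hi.1) hi.2
    rw [this]
    simp
  · have hm' : (0:Int) ≤ m := by omega
    rw [PySem.List.pyRange_one_append 0 m n hm' hmn, List.map_append, List.sum_append]
    have hA : (PySem.List.pyRange 0 m 1).map f = (PySem.List.pyRange 0 m 1).map f' := by
      apply List.map_congr_left
      intro i hi
      rw [PySem.List.mem_pyRange_one] at hi
      exact h1 i hi.1 hi.2
    have hB : (PySem.List.pyRange m n 1).map f = (PySem.List.pyRange m n 1).map (fun _ => (0 : Int)) := by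
      apply List.map_congr_left
      intro i hi
      rw [PySem.List.mem_pyRange_one] at hi
      exact h2 i hi.1 hi.2
    rw [hA, hB]
    simp

lemma pv_main (r : List (String × List (String × List (String × Int)))) (ws : List String) :
    (PySem.List.pyRange 0 (ws.length : Int) 1).foldl (fun acc i =>
        let first := PySem.List.pyGetD ws i ""
        match r.lookup first with
        | none => acc
        | some d1 =>
          let acc1 : Int × Int × Int := (acc.1 + 1, acc.2.1, acc.2.2)
          if i + 1 = (ws.length : Int) then acc1
          else
            let sec := PySem.List.pyGetD ws (i + 1) ""
            match d1.lookup sec with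
            | none => acc1
            | some d2 =>
              let acc2 : Int × Int × Int := (acc1.1, acc1.2.1 + 1, acc1.2.2)
              if i + 2 = (ws.length : Int) then acc2
              else
                let third := PySem.List.pyGetD ws (i + 2) ""
                match d2.lookup third with
                | none => acc2
                | some _ => (acc2.1, acc2.2.1, acc2.2.2 + 1))
      ((0 : Int), (0 : Int), (0 : Int))
    = ((ws.map (fun w => if (r.lookup w).isSome then (1 : Int) else 0)).sum,
       ((PySem.List.pyRange 0 ((ws.length : Int) - 1) 1).map (fun i =>
          if (match r.lookup (PySem.List.pyGetD ws i "") with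
              | some d1 => (d1.lookup (PySem.List.pyGetD ws (i + 1) "")).isSome
              | none => false) then (1 : Int) else 0)).sum,
       ((PySem.List.pyRange 0 ((ws.length : Int) - 2) 1).map (fun i =>
          if (match r.lookup (PySem.List.pyGetD ws i "") with
              | some d1 =>
                (match d1.lookup (PySem.List.pyGetD ws (i + 1) "") with
                 | some d2 => (d2.lookup (PySem.List.pyGetD ws (i + 2) "")).isSome
                 | none => false)
              | none => false) then (1 : Int) else 0)).sum) := by
  have hstep : (fun (acc : Int × Int × Int) (i : Int) =>
        let first := PySem.List.pyGetD ws i ""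
        match r.lookup first with
        | none => acc
        | some d1 =>
          let acc1 : Int × Int × Int := (acc.1 + 1, acc.2.1, acc.2.2)
          if i + 1 = (ws.length : Int) then acc1
          else
            let sec := PySem.List.pyGetD ws (i + 1) ""
            match d1.lookup sec with
            | none => acc1
            | some d2 =>
              let acc2 : Int × Int × Int := (acc1.1, acc1.2.1 + 1, acc1.2.2)
              if i + 2 = (ws.length : Int) then acc2
              else
                let third := PySem.List.pyGetD ws (i + 2) ""
                match d2.lookup third with
                | none => acc2
                | some _ => (acc2.1, acc2.2.1, acc2.2.2 + 1))
      = (fun acc i => (acc.1 + pvF r ws i, acc.2.1 + pvG r ws i, acc.2.2 + pvH r ws i)) := by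
    funext acc i
    simp only [pvF, pvG, pvH]
    cases h1 : r.lookup (PySem.List.pyGetD ws i "") with
    | none => simp
    | some d1 =>
      simp only [Option.isSome_some, if_true]
      by_cases hg1 : i + 1 = (ws.length : Int)
      · simp [hg1]
      · simp only [hg1, if_false]
        cases h2 : d1.lookup (PySem.List.pyGetD ws (i + 1) "") with
        | none => simp
        | some d2 =>
          simp only [Option.isSome_some, if_true]
          by_cases hg2 : i + 2 = (ws.length : Int)
          · simp [hg2]
          · simp only [hg2, if_false]
            cases h3 : d2.lookup (PySem.List.pyGetD ws (i + 2) "") with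
            | none => simp
            | some d3 => simp
  rw [hstep, pv_foldl_dec]
  refine Prod.ext ?_ (Prod.ext ?_ ?_)
  · -- unigrams
    simp only [zero_add]
    have : (PySem.List.pyRange 0 (ws.length : Int) 1).map (pvF r ws)
        = ((PySem.List.pyRange 0 (ws.length : Int) 1).map (fun i => PySem.List.pyGetD ws i "")).map
            (fun w => if (r.lookup w).isSome then (1 : Int) else 0) := by
      rw [List.map_map]; rfl
    rw [this, PySem.List.map_pyGetD_pyRange_zero']
  · -- bigrams
    simp only [zero_add]
    apply pv_sum_guard _ _ ((ws.length : Int) - 1) (ws.length : Int) (by omega)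
    · intro i _ hi
      simp only [pvG]
      cases r.lookup (PySem.List.pyGetD ws i "") with
      | none => simp
      | some d1 =>
        have : ¬ (i + 1 = (ws.length : Int)) := by omega
        simp [this]
    · intro i hi1 hi2
      simp only [pvG]
      cases r.lookup (PySem.List.pyGetD ws i "") with
      | none => rfl
      | some d1 =>
        have : i + 1 = (ws.length : Int) := by omega
        simp [this]
  · -- trigrams
    simp only [zero_add]
    apply pv_sum_guard _ _ ((ws.length : Int) - 2) (ws.length : Int) (by omega)
    · intro i _ hi
      simp only [pvH]
      cases r.lookup (PySem.List.pyGetD ws i "") with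
      | none => simp
      | some d1 =>
        have h1 : ¬ (i + 1 = (ws.length : Int)) := by omega
        have h2 : ¬ (i + 2 = (ws.length : Int)) := by omega
        simp only [h1, if_false, h2]
        obtain hh | ⟨d2, hh⟩ := (d1.lookup (PySem.List.pyGetD ws (i + 1) "")).eq_none_or_eq_some <;>
          simp only [hh]; simp
    · intro i hi1 hi2
      simp only [pvH]
      cases r.lookup (PySem.List.pyGetD ws i "") with
      | none => rfl
      | some d1 =>
        by_cases hg1 : i + 1 = (ws.length : Int)
        · simp [hg1]
        · have hg2 : i + 2 = (ws.length : Int) := by omega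
          simp only [hg1, if_false]
          cases d1.lookup (PySem.List.pyGetD ws (i + 1) "") with
          | none => rfl
          | some d2 => simp [hg2]

-- ===== VERDICT (by name: the statement is the Claim_ definition above) =====
theorem can_gram_count_spec : Claim_equal_can_gram_count := by
  intro ref_count candidate _
  unfold Spec_can_gram_count can_gram_count can_gram_count_alt
  exact pv_main ref_count (PySem.List.slice (PySem.Str.split₀ candidate) (some 1) (some (-1)))
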